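-- pv_equiv track=rewrite | github.com/virgile-ae/turing-test | text.py | parse_subject_after
-- ===== SOURCE A (Python) =====
-- def parse_subject_after(kws, words):
--     """Finds the subject after a certain keyword."""
--     index = 0
--     for i in kws:
--         if i in words:
--             try:
--                 index = words.index(i) + 1
--             except:
--                 pass
--     return words[index:]
-- ===== SOURCE B (Python) =====
-- def parse_subject_after(kws, words):
--     """Finds the subject after a certain keyword."""
--     present = set(words)
--     for k in reversed(kws):
--         if k in present:
--             it = iter(words)
--             for w in it:
--                 if w == k:
--                     return list(it)
--     return words[:]
-- ===== Notes on version B (the rewrite author's own statement) =====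
-- stated objective: faster
-- what changed: A scans all keywords forward, rescanning words for each (membership + list.index) and finally slices; B scans the keywords backwards, stops at the first one present in a precomputed word set, and returns the iterator's remainder after the first matching word in a single pass, with no index arithmetic or slicing.
import Mathlib
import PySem

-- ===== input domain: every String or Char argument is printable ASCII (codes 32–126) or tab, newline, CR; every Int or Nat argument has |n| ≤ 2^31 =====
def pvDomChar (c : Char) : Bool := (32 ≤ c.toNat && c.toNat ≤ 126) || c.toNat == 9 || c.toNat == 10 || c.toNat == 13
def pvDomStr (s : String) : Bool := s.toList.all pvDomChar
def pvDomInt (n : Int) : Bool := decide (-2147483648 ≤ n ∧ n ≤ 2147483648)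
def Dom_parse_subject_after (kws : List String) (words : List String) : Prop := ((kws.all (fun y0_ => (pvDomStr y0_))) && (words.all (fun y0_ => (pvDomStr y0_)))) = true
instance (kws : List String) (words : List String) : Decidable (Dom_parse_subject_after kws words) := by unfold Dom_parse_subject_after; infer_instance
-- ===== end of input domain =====

-- B replaces A's forward keyword loop with per-keyword rescans of `words` by a backward
-- keyword scan with early exit against a word set and a single forward pass over `words`
-- (iterator remainder instead of index+slice); asymptotically faster.

-- ===== PORT A =====
-- for i in kws: if i in words: index = words.index(i) + 1 (try/except: a failing index leaves index unchanged)
def parse_subject_after (kws : List String) (words : List String) : List String :=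
  let index : Int := kws.foldl (fun index i =>
    if words.contains i then
      match PySem.List.index? words i with
      | some j => (j : Int) + 1
      | none => index
    else index) 0
  PySem.List.slice words (some index) none

-- ===== PORT B =====
-- inner 'for w in it: if w == k: return list(it)': remainder of the iterator after the
-- first match, none if the loop finishes without a match
def pvFindRest (k : String) : List String → Option (List String)
  | [] => none
  | w :: ws => if w == k then some ws else pvFindRest k ws

-- outer 'for k in reversed(kws): if k in present: …'; base case is 'return words[:]'
def pvScanKws (present : PySem.Set String) (words : List String) : List String → List String
  | [] => PySem.List.slice words none none
  | k :: rest =>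
    if PySem.Set.contains present k then
      match pvFindRest k words with
      | some r => r
      | none => pvScanKws present words rest
    else pvScanKws present words rest

def parse_subject_after_alt (kws : List String) (words : List String) : List String :=
  pvScanKws (PySem.Set.ofList words) words kws.reverse

-- ===== PRECONDITION & SPEC =====
def Spec_parse_subject_after (kws : List String) (words : List String) (out : List String) : Prop := out = parse_subject_after_alt kws words
instance (kws : List String) (words : List String) (out : List String) : Decidable (Spec_parse_subject_after kws words out) := by unfold Spec_parse_subject_after; infer_instance

-- ===== CLAIM (what is proved, stated in full; the proofs are below) =====
def Claim_equal_parse_subject_after : Prop := ∀ (kws : List String) (words : List String), Dom_parse_subject_after kws words → Spec_parse_subject_after kws words (parse_subject_after kws words)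

-- ===== LEMMAS AND PROOFS =====

-- common reference value: the first keyword of l present in words picks the suffix after
-- its first occurrence; no such keyword gives words itself
def pvCommon (words : List String) (l : List String) : List String :=
  match l.find? (fun k => words.contains k) with
  | some k =>
    match PySem.List.index? words k with
    | some j => words.drop (j + 1)
    | none => words
  | none => words

theorem pvFindRest_eq (k : String) (words : List String) :
    pvFindRest k words = (PySem.List.index? words k).map (fun j => words.drop (j + 1)) := by
  induction words with
  | nil => simp [pvFindRest, PySem.List.index?_eq_idxOf?]
  | cons w ws ih =>
    by_cases h : w = k
    · subst h
      rw [PySem.List.index?_cons_self]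
      simp [pvFindRest]
    · rw [PySem.List.index?_cons_of_ne (h := h)]
      show (if (w == k) = true then some ws else pvFindRest k ws) = _
      rw [if_neg (by simpa using h), ih]
      cases PySem.List.index? ws k <;> simp

theorem pvScanKws_eq_common (words : List String) (l : List String) :
    pvScanKws (PySem.Set.ofList words) words l = pvCommon words l := by
  induction l with
  | nil => simp [pvScanKws, pvCommon, PySem.List.slice_none_none]
  | cons k rest ih =>
    by_cases hm : k ∈ words
    · have hcond : PySem.Set.contains (PySem.Set.ofList words) k = true :=
        (PySem.Set.contains_iff _ _).mpr ((PySem.Set.mem_ofList _ _).mpr hm)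
      obtain ⟨j, hj⟩ := Option.isSome_iff_exists.mp
        ((PySem.List.index?_isSome_iff words k).mpr hm)
      have hfind : (k :: rest).find? (fun k => words.contains k) = some k :=
        List.find?_cons_of_pos (h := by simpa using hm)
      unfold pvScanKws pvCommon
      rw [if_pos hcond, pvFindRest_eq, hj, hfind]
      rw [PySem.List.index?_eq_idxOf?] at hj
      simp [hj]
    · have hcond : ¬ PySem.Set.contains (PySem.Set.ofList words) k = true := by
        intro h
        exact hm ((PySem.Set.mem_ofList _ _).mp ((PySem.Set.contains_iff _ _).mp h))
      have hfind : (k :: rest).find? (fun k => words.contains k)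
          = rest.find? (fun k => words.contains k) :=
        List.find?_cons_of_neg (h := by simpa using hm)
      unfold pvScanKws
      rw [if_neg hcond, ih]
      unfold pvCommon
      rw [hfind]

theorem foldA_eq (words : List String) (kws : List String) (a : Int) :
    kws.foldl (fun index i =>
      if words.contains i then
        match PySem.List.index? words i with
        | some j => (j : Int) + 1
        | none => index
      else index) a
    = match kws.reverse.find? (fun k => words.contains k) with
      | some k =>
        match PySem.List.index? words k with
        | some j => (j : Int) + 1
        | none => a
      | none => a := by
  induction kws using List.reverseRecOn generalizing a with
  | nil => simp
  | append_singleton l k ih =>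
    rw [List.foldl_append, List.reverse_append]
    simp only [List.foldl_cons, List.foldl_nil, List.reverse_singleton, List.singleton_append]
    by_cases hm : k ∈ words
    · obtain ⟨j, hj⟩ := Option.isSome_iff_exists.mp
        ((PySem.List.index?_isSome_iff words k).mpr hm)
      have hj' : List.idxOf? k words = some j := by
        rw [PySem.List.index?_eq_idxOf?] at hj; exact hj
      rw [List.find?_cons_of_pos (h := by simpa using hm),
        if_pos (by simpa using hm), hj]
      simp [hj']
    · have hn : PySem.List.index? words k = none :=
        (PySem.List.index?_eq_none_iff words k).mpr hm
      rw [List.find?_cons_of_neg (h := by simpa using hm),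
        if_neg (by simpa using hm), ih]

theorem A_eq_common (kws words : List String) :
    parse_subject_after kws words = pvCommon words kws.reverse := by
  unfold parse_subject_after
  rw [foldA_eq]
  unfold pvCommon
  cases hfind : kws.reverse.find? (fun k => words.contains k) with
  | none =>
    simp only []
    rw [show ((0 : Int) = ((0 : Nat) : Int)) from rfl, PySem.List.slice_from_natCast]
    simp
  | some k =>
    have hm : k ∈ words := by
      have := List.find?_some hfind
      simpa using this
    obtain ⟨j, hj⟩ := Option.isSome_iff_exists.mp ((PySem.List.index?_isSome_iff words k).mpr hm)
    simp only [hj]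
    rw [show ((j : Int) + 1 = ((j + 1 : Nat) : Int)) by push_cast; ring, PySem.List.slice_from_natCast]

-- ===== VERDICT (by name: the statement is the Claim_ definition above) =====
theorem parse_subject_after_spec : Claim_equal_parse_subject_after := by
  intro kws words _
  unfold Spec_parse_subject_after parse_subject_after_alt
  rw [pvScanKws_eq_common, A_eq_common]
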